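-- pv_equiv track=rewrite | github.com/victorasido/WPS | src/shared/text_utils.py | best_matching_line
-- ===== SOURCE A (Python) =====
-- def best_matching_line(keyword: str, cell_text: str) -> str:
--     """
--     Ekstrak baris paling relevan dari cell_text terhadap keyword.
--
--     Cell bisa mengandung banyak baris — misalnya:
--         "Developer\nFarino Joshua\nPT. Bank Negara Indonesia"
--
--     Fungsi ini return baris yang mengandung keyword, bukan full cell text.
--     Fallback ke baris pertama non-kosong jika tidak ada baris yang match.
--
--     Contoh:
--         keyword="Farino", cell="Farino Joshua"         → "Farino Joshua"
--         keyword="Division Head", cell="Division Head\nDivisi IT\nPT. BNI"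
--                                                         → "Division Head"
--         keyword="Manager", cell="Approval\nManager Keuangan\nPT. BNI"
--                                                         → "Manager Keuangan"
--     """
--     lines = [l.strip() for l in cell_text.splitlines() if l.strip()]
--     if not lines:
--         return keyword
--
--     kw_lower = keyword.lower()
--     kw_words = kw_lower.split()
--
--     def line_score(line: str) -> int:
--         ll = line.lower()
--         return sum(1 for w in kw_words if w in ll)
--
--     def is_separator(line: str) -> bool:
--         """Baris pemisah antar slot (garis --- atau baris kosong)."""
--         stripped = line.strip().replace(" ", "")
--         return len(stripped) >= 3 and all(c in "-_" for c in stripped)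
--
--     # Step 1: Temukan baris dengan skor tertinggi sebagai "anchor"
--     best_idx   = max(range(len(lines)), key=lambda i: line_score(lines[i]))
--     best_score = line_score(lines[best_idx])
--
--     # Jika anchor tidak punya satupun kata keyword, fallback ke baris pertama
--     if best_score == 0:
--         return lines[0]
--
--     # Step 2: Expand ke atas dari anchor (selama ada irisan kata & bukan separator)
--     start = best_idx
--     while start > 0:
--         candidate = lines[start - 1]
--         if is_separator(candidate) or line_score(candidate) == 0:
--             break
--         start -= 1
--
--     # Step 3: Expand ke bawah dari anchor (selama ada irisan kata & bukan separator)
--     end = best_idx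
--     while end < len(lines) - 1:
--         candidate = lines[end + 1]
--         if is_separator(candidate) or line_score(candidate) == 0:
--             break
--         end += 1
--
--     # Gabungkan blok kontigu yang ditemukan
--     block = lines[start : end + 1]
--     return " \n".join(block) if len(block) > 1 else block[0]
-- ===== SOURCE B (Python) =====
-- def best_matching_line(keyword: str, cell_text: str) -> str:
--     lines = [l.strip() for l in cell_text.splitlines() if l.strip()]
--     if not lines:
--         return keyword
--
--     kw_words = keyword.lower().split()
--
--     def line_score(line: str) -> int:
--         ll = line.lower()
--         return sum(1 for w in kw_words if w in ll)
--
--     def is_separator(line: str) -> bool: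
--         stripped = line.strip().replace(" ", "")
--         return len(stripped) >= 3 and all(c in "-_" for c in stripped)
--
--     # score every line once, then take the value and first position of the maximum
--     scores = [line_score(l) for l in lines]
--     best_score = max(scores)
--     if best_score == 0:
--         return lines[0]
--     anchor = scores.index(best_score)
--
--     def boundary(j: int) -> bool:
--         return is_separator(lines[j]) or scores[j] == 0
--
--     # forward sweep: start = one past the last boundary strictly before the anchor
--     start = 0
--     for j in range(anchor):
--         if boundary(j):
--             start = j + 1
--     # backward sweep: end = one before the first boundary strictly after the anchor
--     end = len(lines) - 1
--     for j in range(len(lines) - 1, anchor, -1):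
--         if boundary(j):
--             end = j - 1
--     return " \n".join(lines[start:end + 1])
-- ===== Notes on version B (the rewrite author's own statement) =====
-- stated objective: alternative
-- what changed: A expands a block outward from the best-scoring anchor line with two early-breaking while loops; B precomputes all line scores once, takes the value and first index of the maximum, and finds the block bounds with two bounded range sweeps (last boundary before the anchor / first boundary after it), always joining the resulting slice.
import Mathlib
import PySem

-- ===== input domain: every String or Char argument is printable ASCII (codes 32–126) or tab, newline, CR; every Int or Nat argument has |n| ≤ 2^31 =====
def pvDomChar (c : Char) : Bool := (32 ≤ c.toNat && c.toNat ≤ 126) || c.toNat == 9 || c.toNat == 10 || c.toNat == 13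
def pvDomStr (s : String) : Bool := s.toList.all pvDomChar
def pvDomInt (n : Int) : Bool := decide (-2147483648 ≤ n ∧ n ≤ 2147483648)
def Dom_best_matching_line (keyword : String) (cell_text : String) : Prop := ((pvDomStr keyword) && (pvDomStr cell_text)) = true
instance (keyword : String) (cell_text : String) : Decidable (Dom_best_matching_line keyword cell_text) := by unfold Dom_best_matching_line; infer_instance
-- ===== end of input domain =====

-- B replaces A's anchor-centred while-loop expansion by two bounded range sweeps over
-- precomputed line scores (last boundary before / first boundary after the anchor);
-- objective: alternative decomposition, same cost.

-- shared helpers: both Python versions define `lines`, `line_score` and `is_separator` identically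
def pvLines (cell_text : String) : List String :=
  (PySem.Str.splitlines cell_text).filterMap
    (fun l => if PySem.Str.strip l = "" then none else some (PySem.Str.strip l))

def pvScore (kw_words : List String) (line : String) : Int :=
  let ll := PySem.Str.lower line
  kw_words.foldl (fun s w => if PySem.Str.isIn w ll then s + 1 else s) 0

def pvIsSep (line : String) : Bool :=
  let stripped := PySem.Str.replace (PySem.Str.strip line) " " ""
  decide (3 ≤ PySem.Str.len stripped) && stripped.toList.all (fun c => c == '-' || c == '_')

-- ===== PORT A =====
-- A's Step-2 while loop: move `start` upward while the line above is not a boundary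
def pvUpA (bnd : Nat → Bool) : Nat → Nat
  | 0 => 0
  | s + 1 => if bnd s then s + 1 else pvUpA bnd s

-- A's Step-3 while loop: move `end` downward while the next line is not a boundary
def pvDownA (bnd : Nat → Bool) (n : Nat) (e : Nat) : Nat :=
  if e < n - 1 then (if bnd (e + 1) then e else pvDownA bnd n (e + 1)) else e
  termination_by n - 1 - e

def best_matching_line (keyword : String) (cell_text : String) : String :=
  let lines := pvLines cell_text
  if lines.isEmpty then keyword
  else
    let kw_words := PySem.Str.split₀ (PySem.Str.lower keyword)
    let bestIdx : Int := PySem.List.maxD (PySem.List.pyRange 0 (lines.length : Int) 1)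
        (fun i => pvScore kw_words (lines.getD i.toNat "")) 0
    let bestScore := pvScore kw_words (lines.getD bestIdx.toNat "")
    if bestScore = 0 then lines.getD 0 ""
    else
      let bnd : Nat → Bool := fun i =>
        pvIsSep (lines.getD i "") || (pvScore kw_words (lines.getD i "") == 0)
      let start := pvUpA bnd bestIdx.toNat
      let e := pvDownA bnd lines.length bestIdx.toNat
      let block := PySem.List.slice lines (some (start : Int)) (some ((e : Int) + 1))
      if 1 < block.length then PySem.Str.join " \n" block else block.getD 0 ""

-- ===== PORT B =====
def best_matching_line_alt (keyword : String) (cell_text : String) : String :=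
  let lines := pvLines cell_text
  if lines.isEmpty then keyword
  else
    let kw_words := PySem.Str.split₀ (PySem.Str.lower keyword)
    let scores := lines.map (pvScore kw_words)
    let bestScore := PySem.List.maxD scores (fun s => s) 0
    if bestScore = 0 then lines.getD 0 ""
    else
      let anchor : Nat := (PySem.List.index? scores bestScore).getD 0
      let bnd : Nat → Bool := fun j =>
        pvIsSep (lines.getD j "") || (scores.getD j 0 == 0)
      -- forward sweep: start = one past the last boundary strictly before the anchor
      let start : Int := (PySem.List.pyRange 0 (anchor : Int) 1).foldl
        (fun s j => if bnd j.toNat then j + 1 else s) 0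
      -- backward sweep: end = one before the first boundary strictly after the anchor
      let e : Int := (PySem.List.pyRange ((lines.length : Int) - 1) (anchor : Int) (-1)).foldl
        (fun e j => if bnd j.toNat then j - 1 else e) ((lines.length : Int) - 1)
      PySem.Str.join " \n" (PySem.List.slice lines (some start) (some (e + 1)))

-- ===== PRECONDITION & SPEC =====
def Spec_best_matching_line (keyword : String) (cell_text : String) (out : String) : Prop := out = best_matching_line_alt keyword cell_text
instance (keyword : String) (cell_text : String) (out : String) : Decidable (Spec_best_matching_line keyword cell_text out) := by unfold Spec_best_matching_line; infer_instance

-- ===== CLAIM (what is proved, stated in full; the proofs are below) =====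
def Claim_equal_best_matching_line : Prop := ∀ (keyword : String) (cell_text : String), Dom_best_matching_line keyword cell_text → Spec_best_matching_line keyword cell_text (best_matching_line keyword cell_text)

-- ===== LEMMAS AND PROOFS =====

-- first argmax of f on [0, n)
def pvFA (f : Nat → Int) : Nat → Nat
  | 0 => 0
  | n + 1 => if n = 0 then 0 else if f (pvFA f n) < f n then n else pvFA f n

lemma pvFA_lt (f : Nat → Int) (n : Nat) (h : 0 < n) : pvFA f n < n := by
  induction n with
  | zero => omega
  | succ n ih =>
    by_cases hn : n = 0
    · simp [pvFA, hn]
    · have := ih (by omega)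
      simp only [pvFA, hn, if_false]
      split <;> omega

lemma pvFA_max (f : Nat → Int) (n : Nat) : ∀ i < n, f i ≤ f (pvFA f n) := by
  induction n with
  | zero => omega
  | succ n ih =>
    intro i hi
    by_cases hn : n = 0
    · subst hn; interval_cases i; simp [pvFA]
    · simp only [pvFA, hn, if_false]
      rcases Nat.lt_succ_iff_lt_or_eq.mp hi with h | h
      · have := ih i h; split <;> omega
      · subst h; split <;> omega

lemma pvFA_first (f : Nat → Int) (n : Nat) : ∀ i < pvFA f n, f i < f (pvFA f n) := by
  induction n with
  | zero => simp [pvFA]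
  | succ n ih =>
    intro i hi
    by_cases hn : n = 0
    · simp [pvFA, hn] at hi
    · simp only [pvFA, hn, if_false] at hi ⊢
      by_cases h : f (pvFA f n) < f n
      · simp only [if_pos h] at hi ⊢
        exact lt_of_le_of_lt (pvFA_max f n i hi) h
      · simp only [if_neg h] at hi ⊢
        exact ih i hi

lemma pv_max?_append_singleton {α : Type} (xs : List α) (x : α) (key : α → Int) :
    PySem.List.max? (xs ++ [x]) key =
      match PySem.List.max? xs key with
      | none => some x
      | some m => if key m < key x then some x else some m := by
  simp only [PySem.List.max?, List.foldl_append, List.foldl_cons, List.foldl_nil]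
  rfl

-- A's max(range(n), key=...) finds the first argmax
lemma pv_maxA_eq (f : Nat → Int) (n : Nat) (h : 0 < n) :
    PySem.List.max? (List.map (fun k : Nat => (k : Int)) (List.range n)) (fun i => f i.toNat)
      = some ((pvFA f n : Nat) : Int) := by
  induction n with
  | zero => omega
  | succ n ih =>
    by_cases hn : n = 0
    · subst hn
      simp [PySem.List.max?, pvFA, List.range_one]
    · rw [List.range_succ, List.map_append, List.map_cons, List.map_nil,
          pv_max?_append_singleton, ih (by omega)]
      simp only [pvFA, hn, if_false, Int.toNat_natCast]
      split <;> simp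

-- B's max(scores) is the value of f at the first argmax
lemma pv_maxB_eq (f : Nat → Int) (n : Nat) (h : 0 < n) :
    PySem.List.max? (List.map f (List.range n)) (fun s => s) = some (f (pvFA f n)) := by
  induction n with
  | zero => omega
  | succ n ih =>
    by_cases hn : n = 0
    · subst hn
      simp [PySem.List.max?, pvFA, List.range_one]
    · rw [List.range_succ, List.map_append, List.map_cons, List.map_nil,
          pv_max?_append_singleton, ih (by omega)]
      simp only [pvFA, hn, if_false]
      split <;> simp

-- B's scores.index(best) is the first argmax
lemma pv_idx_eq (f : Nat → Int) (n : Nat) (h : 0 < n) :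
    PySem.List.index? (List.map f (List.range n)) (f (pvFA f n)) = some (pvFA f n) := by
  simp only [PySem.List.index?]
  rw [List.idxOf?_eq_some_iff]
  refine ⟨by simpa using pvFA_lt f n h, by simp, ?_⟩
  intro j hj
  have h1 := pvFA_first f n j hj
  simp only [List.getElem_map, List.getElem_range]
  omega

lemma pv_map_eq_map_range (g : String → Int) (l : List String) :
    List.map g l = List.map (fun i => g (l.getD i "")) (List.range l.length) := by
  apply List.ext_getElem
  · simp
  · intro i h1 h2
    have h3 : i < l.length := by simpa using h1
    simp only [List.getElem_map, List.getElem_range, List.getD_eq_getElem _ _ h3]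

-- B's forward sweep equals A's upward while loop
lemma pv_up_fold (bnd : Nat → Bool) (k : Nat) :
    (PySem.List.pyRange 0 (k : Int) 1).foldl (fun s j => if bnd j.toNat then j + 1 else s) 0
      = ((pvUpA bnd k : Nat) : Int) := by
  rw [PySem.List.pyRange_zero_natCast, List.foldl_map]
  simp only [Int.toNat_natCast]
  induction k with
  | zero => simp [pvUpA]
  | succ k ih =>
    rw [List.range_succ, List.foldl_append]
    simp only [List.foldl_cons, List.foldl_nil, ih, pvUpA]
    split <;> simp

lemma pv_pyRange_neg_one_cons {a b : Int} (h : b < a) :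
    PySem.List.pyRange a b (-1) = a :: PySem.List.pyRange (a - 1) b (-1) := by
  simp only [PySem.List.pyRange]
  norm_num
  have hm : (a - b).toNat = (a - 1 - b).toNat + 1 := by omega
  by_cases h1 : b < a - 1
  · simp only [if_pos h, if_pos h1]
    rw [hm, List.range_succ_eq_map]
    simp only [List.map_cons, List.map_map, Nat.cast_zero, neg_zero, add_zero, List.cons.injEq]
    refine ⟨trivial, ?_⟩
    apply List.map_congr_left
    intro x _
    simp only [Function.comp_apply, Nat.succ_eq_add_one]
    push_cast
    ring
  · have hb : b = a - 1 := by omega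
    simp only [if_pos h, if_neg h1]
    subst hb
    have h2 : (a - (a - 1)).toNat = 1 := by omega
    rw [h2]
    simp

-- B's backward sweep equals A's downward while loop
lemma pv_down_fold_aux (bnd : Nat → Bool) (n : Nat) (anchor : Nat) :
    ∀ d a, anchor ≤ a → a ≤ n - 1 → a - anchor = d →
    (PySem.List.pyRange (a : Int) (anchor : Int) (-1)).foldl
        (fun e j => if bnd j.toNat then j - 1 else e) ((pvDownA bnd n a : Nat) : Int)
      = ((pvDownA bnd n anchor : Nat) : Int) := by
  intro d
  induction d with
  | zero =>
    intro a h1 h2 h3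
    have ha : a = anchor := by omega
    subst ha
    have he : PySem.List.pyRange (a : Int) (a : Int) (-1) = [] := by
      simp [PySem.List.pyRange]
    rw [he, List.foldl_nil]
  | succ d ih =>
    intro a h1 h2 h3
    have hlt : anchor < a := by omega
    rw [pv_pyRange_neg_one_cons (by exact_mod_cast hlt), List.foldl_cons]
    have hstep : (if bnd (a : Int).toNat then (a : Int) - 1 else ((pvDownA bnd n a : Nat) : Int))
        = ((pvDownA bnd n (a - 1) : Nat) : Int) := by
      have h4 : a - 1 < n - 1 := by omega
      conv_rhs => rw [pvDownA]
      rw [if_pos h4]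
      have h5 : a - 1 + 1 = a := by omega
      rw [h5]
      simp only [Int.toNat_natCast]
      by_cases hb : bnd a = true
      · rw [if_pos hb, if_pos hb]
        omega
      · rw [if_neg hb, if_neg hb]
    rw [hstep]
    have hcast : (a : Int) - 1 = ((a - 1 : Nat) : Int) := by omega
    rw [hcast]
    exact ih (a - 1) (by omega) (by omega) (by omega)

lemma pv_down_fold (bnd : Nat → Bool) (n anchor : Nat) (hn : 0 < n) (ha : anchor < n) :
    (PySem.List.pyRange ((n : Int) - 1) (anchor : Int) (-1)).foldl
        (fun e j => if bnd j.toNat then j - 1 else e) ((n : Int) - 1)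
      = ((pvDownA bnd n anchor : Nat) : Int) := by
  have h1 : ((n : Int) - 1) = ((n - 1 : Nat) : Int) := by omega
  have h2 : pvDownA bnd n (n - 1) = n - 1 := by rw [pvDownA]; simp
  have h3 := pv_down_fold_aux bnd n anchor (n - 1 - anchor) (n - 1) (by omega) le_rfl rfl
  rw [h2] at h3
  rw [h1]
  exact h3

lemma pvUpA_le (bnd : Nat → Bool) (k : Nat) : pvUpA bnd k ≤ k := by
  induction k with
  | zero => simp [pvUpA]
  | succ k ih => rw [pvUpA]; split <;> omega

lemma pvDownA_ge (bnd : Nat → Bool) (n e : Nat) : e ≤ pvDownA bnd n e := by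
  induction e using pvDownA.induct bnd n with
  | case1 e h1 h2 => rw [pvDownA]; simp only [if_pos h1, if_pos h2]; exact le_rfl
  | case2 e h1 h2 ih => rw [pvDownA]; simp only [if_pos h1, if_neg h2]; omega
  | case3 e h1 => rw [pvDownA]; simp only [if_neg h1]; exact le_rfl

lemma pvDownA_lt (bnd : Nat → Bool) (n e : Nat) (h : e < n) : pvDownA bnd n e < n := by
  induction e using pvDownA.induct bnd n with
  | case1 e h1 h2 => rw [pvDownA]; simp only [if_pos h1, if_pos h2]; omega
  | case2 e h1 h2 ih => rw [pvDownA]; simp only [if_pos h1, if_neg h2]; exact ih (by omega)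
  | case3 e h1 => rw [pvDownA]; simp only [if_neg h1]; exact h

lemma pvUpA_congr (bnd bnd' : Nat → Bool) (k : Nat) (h : ∀ j < k, bnd j = bnd' j) :
    pvUpA bnd k = pvUpA bnd' k := by
  induction k with
  | zero => rfl
  | succ k ih =>
    simp only [pvUpA]
    rw [h k (by omega), ih (fun j hj => h j (by omega))]

lemma pvDownA_congr (bnd bnd' : Nat → Bool) (n : Nat) (h : ∀ j < n, bnd j = bnd' j) (e : Nat) :
    pvDownA bnd n e = pvDownA bnd' n e := by
  induction e using pvDownA.induct bnd n with
  | case1 e h1 h2 =>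
    have h2' := h2
    rw [h (e + 1) (by omega)] at h2'
    conv_lhs => rw [pvDownA]
    conv_rhs => rw [pvDownA]
    rw [if_pos h1, if_pos h1, if_pos h2, if_pos h2']
  | case2 e h1 h2 ih =>
    have h2' := h2
    rw [h (e + 1) (by omega)] at h2'
    conv_lhs => rw [pvDownA]
    conv_rhs => rw [pvDownA]
    rw [if_pos h1, if_pos h1, if_neg h2, if_neg h2', ih]
  | case3 e h1 =>
    conv_lhs => rw [pvDownA]
    conv_rhs => rw [pvDownA]
    rw [if_neg h1, if_neg h1]

lemma pv_join_singleton (sep p : String) : PySem.Str.join sep [p] = p := by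
  rw [← String.toList_inj, PySem.Str.toList_join]
  simp [PySem.Chars.join_singleton]

theorem pv_main (keyword cell_text : String) :
    best_matching_line keyword cell_text = best_matching_line_alt keyword cell_text := by
  simp only [best_matching_line, best_matching_line_alt]
  generalize pvLines cell_text = lines
  generalize PySem.Str.split₀ (PySem.Str.lower keyword) = kw
  by_cases hE : lines.isEmpty = true
  · rw [if_pos hE, if_pos hE]
  · rw [if_neg hE, if_neg hE]
    beta_reduce
    have hn0 : 0 < lines.length := by
      cases lines with
      | nil => simp at hE
      | cons a l => simp
    have hA : PySem.List.maxD (PySem.List.pyRange 0 (lines.length : Int) 1)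
        (fun i => pvScore kw (lines.getD i.toNat "")) 0
        = ((pvFA (fun i => pvScore kw (lines.getD i "")) lines.length : Nat) : Int) := by
      unfold PySem.List.maxD
      rw [PySem.List.pyRange_zero_natCast]
      exact congrArg (fun o => o.getD 0)
        (pv_maxA_eq (fun i => pvScore kw (lines.getD i "")) lines.length hn0)
    have hB : PySem.List.maxD (List.map (pvScore kw) lines) (fun s => s) 0
        = pvScore kw (lines.getD (pvFA (fun i => pvScore kw (lines.getD i "")) lines.length) "") := by
      unfold PySem.List.maxD
      rw [pv_map_eq_map_range]
      exact congrArg (fun o => o.getD 0)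
        (pv_maxB_eq (fun i => pvScore kw (lines.getD i "")) lines.length hn0)
    rw [hA, hB]
    simp only [Int.toNat_natCast]
    by_cases hz : pvScore kw
        (lines.getD (pvFA (fun i => pvScore kw (lines.getD i "")) lines.length) "") = 0
    · rw [if_pos hz, if_pos hz]
    · rw [if_neg hz, if_neg hz]
      have hanchor : (PySem.List.index? (List.map (pvScore kw) lines)
          (pvScore kw (lines.getD (pvFA (fun i => pvScore kw (lines.getD i "")) lines.length) ""))).getD 0
          = pvFA (fun i => pvScore kw (lines.getD i "")) lines.length := by
        rw [pv_map_eq_map_range]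
        exact congrArg (fun o => o.getD 0)
          (pv_idx_eq (fun i => pvScore kw (lines.getD i "")) lines.length hn0)
      rw [hanchor]
      have hfa_lt : pvFA (fun i => pvScore kw (lines.getD i "")) lines.length < lines.length :=
        pvFA_lt _ _ hn0
      have hbnd : ∀ j < lines.length,
          (pvIsSep (lines.getD j "") || ((List.map (pvScore kw) lines).getD j 0 == 0))
            = (pvIsSep (lines.getD j "") || (pvScore kw (lines.getD j "") == 0)) := by
        intro j hj
        have hj' : j < (List.map (pvScore kw) lines).length := by simpa using hj
        rw [List.getD_eq_getElem _ _ hj', List.getElem_map, List.getD_eq_getElem _ _ hj]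
      have hstart : (PySem.List.pyRange 0
            ((pvFA (fun i => pvScore kw (lines.getD i "")) lines.length : Nat) : Int) 1).foldl
            (fun s j => if pvIsSep (lines.getD j.toNat "")
                || ((List.map (pvScore kw) lines).getD j.toNat 0 == 0) then j + 1 else s) 0
          = ((pvUpA (fun i => pvIsSep (lines.getD i "") || (pvScore kw (lines.getD i "") == 0))
              (pvFA (fun i => pvScore kw (lines.getD i "")) lines.length) : Nat) : Int) := by
        have h1 := pv_up_fold
          (fun j => pvIsSep (lines.getD j "") || ((List.map (pvScore kw) lines).getD j 0 == 0))
          (pvFA (fun i => pvScore kw (lines.getD i "")) lines.length)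
        have h2 := pvUpA_congr
          (fun j => pvIsSep (lines.getD j "") || ((List.map (pvScore kw) lines).getD j 0 == 0))
          (fun i => pvIsSep (lines.getD i "") || (pvScore kw (lines.getD i "") == 0))
          (pvFA (fun i => pvScore kw (lines.getD i "")) lines.length)
          (fun j hj => hbnd j (lt_trans hj hfa_lt))
        rw [h2] at h1
        exact h1
      have hend : (PySem.List.pyRange ((lines.length : Int) - 1)
            ((pvFA (fun i => pvScore kw (lines.getD i "")) lines.length : Nat) : Int) (-1)).foldl
            (fun e j => if pvIsSep (lines.getD j.toNat "")
                || ((List.map (pvScore kw) lines).getD j.toNat 0 == 0) then j - 1 else e)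
            ((lines.length : Int) - 1)
          = ((pvDownA (fun i => pvIsSep (lines.getD i "") || (pvScore kw (lines.getD i "") == 0))
              lines.length (pvFA (fun i => pvScore kw (lines.getD i "")) lines.length) : Nat) : Int) := by
        have h1 := pv_down_fold
          (fun j => pvIsSep (lines.getD j "") || ((List.map (pvScore kw) lines).getD j 0 == 0))
          lines.length (pvFA (fun i => pvScore kw (lines.getD i "")) lines.length) hn0 hfa_lt
        have h2 := pvDownA_congr
          (fun j => pvIsSep (lines.getD j "") || ((List.map (pvScore kw) lines).getD j 0 == 0))
          (fun i => pvIsSep (lines.getD i "") || (pvScore kw (lines.getD i "") == 0))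
          lines.length hbnd
          (pvFA (fun i => pvScore kw (lines.getD i "")) lines.length)
        rw [h2] at h1
        exact h1
      rw [hstart, hend]
      -- both sides now hold the same block; A joins only when it has more than one line
      have hse : pvUpA (fun i => pvIsSep (lines.getD i "") || (pvScore kw (lines.getD i "") == 0))
            (pvFA (fun i => pvScore kw (lines.getD i "")) lines.length)
          ≤ pvDownA (fun i => pvIsSep (lines.getD i "") || (pvScore kw (lines.getD i "") == 0))
            lines.length (pvFA (fun i => pvScore kw (lines.getD i "")) lines.length) :=
        le_trans (pvUpA_le _ _) (pvDownA_ge _ _ _)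
      have hen : pvDownA (fun i => pvIsSep (lines.getD i "") || (pvScore kw (lines.getD i "") == 0))
            lines.length (pvFA (fun i => pvScore kw (lines.getD i "")) lines.length) < lines.length :=
        pvDownA_lt _ _ _ hfa_lt
      generalize hs : pvUpA (fun i => pvIsSep (lines.getD i "") || (pvScore kw (lines.getD i "") == 0))
            (pvFA (fun i => pvScore kw (lines.getD i "")) lines.length) = s at hse
      generalize he : pvDownA (fun i => pvIsSep (lines.getD i "") || (pvScore kw (lines.getD i "") == 0))
            lines.length (pvFA (fun i => pvScore kw (lines.getD i "")) lines.length) = e at hse hen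
      have hcast : ((e : Nat) : Int) + 1 = ((e + 1 : Nat) : Int) := by omega
      rw [hcast, PySem.List.slice_natCast]
      have hpos : 0 < ((lines.drop s).take (e + 1 - s)).length := by
        simp only [List.length_take, List.length_drop]
        omega
      by_cases h1 : 1 < ((lines.drop s).take (e + 1 - s)).length
      · rw [if_pos h1]
      · rw [if_neg h1]
        obtain ⟨x, hx⟩ := List.length_eq_one_iff.mp
          (show ((lines.drop s).take (e + 1 - s)).length = 1 by omega)
        rw [hx, pv_join_singleton]
        rfl

-- ===== VERDICT (by name: the statement is the Claim_ definition above) =====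
theorem best_matching_line_spec : Claim_equal_best_matching_line := by
  intro keyword cell_text _
  unfold Spec_best_matching_line
  exact pv_main keyword cell_text
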